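-- pv_equiv track=rewrite | github.com/miliar/Code_Jam_Webscraper | solutions_python/solutions_year16_round0_nr3/1893.py | GetRepr
-- ===== SOURCE A (Python) =====
-- def GetRepr(x, base):
-- 	ret = 0
-- 	basePow = 1
-- 	while (x):
-- 		ret += (x & 1) * basePow
-- 		basePow *= base
-- 		x >>= 1
-- 	return ret
-- ===== SOURCE B (Python) =====
-- def GetRepr(x, base):
-- 	# Horner's method, scanning x's bits MSB-first with a single accumulator.
-- 	ret = 0
-- 	for i in range(x.bit_length() - 1, -1, -1):
-- 		ret = ret * base + ((x >> i) & 1)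
-- 	return ret
-- ===== Notes on version B (the rewrite author's own statement) =====
-- stated objective: alternative
-- what changed: Replaces A's LSB-first loop that maintains a running power of the base with Horner's method: a single accumulator scans the bits MSB-first (ret = ret*base + bit), so no basePow state is kept.
import Mathlib
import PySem

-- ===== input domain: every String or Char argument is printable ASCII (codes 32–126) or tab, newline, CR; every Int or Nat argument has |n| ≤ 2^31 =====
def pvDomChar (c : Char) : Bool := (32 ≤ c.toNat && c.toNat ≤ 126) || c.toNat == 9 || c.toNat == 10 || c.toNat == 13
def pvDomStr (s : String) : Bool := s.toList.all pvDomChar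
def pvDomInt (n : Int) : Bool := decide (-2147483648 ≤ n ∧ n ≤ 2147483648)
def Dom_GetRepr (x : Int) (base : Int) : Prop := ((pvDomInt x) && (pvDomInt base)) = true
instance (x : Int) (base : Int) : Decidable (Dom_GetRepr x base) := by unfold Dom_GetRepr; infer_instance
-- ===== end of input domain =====

-- B reads x's bits MSB-first with Horner's method (single accumulator), instead of A's
-- LSB-first loop carrying a running power of the base; same O(bits(x)) cost (objective: alternative).

-- ===== PORT A =====
-- A's while loop: condition 'while (x)' is x ≠ 0, but Python DIVERGES for x < 0
-- (x >>= 1 never reaches 0); Pre_ excludes x < 0, and the port guards with 0 < x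
-- only to be total — for x ≥ 0 the guard coincides with Python's x ≠ 0.
def GetReprLoopA (x ret basePow base : Int) : Int :=
  if _h : 0 < x then
    GetReprLoopA (x >>> (1 : Nat)) (ret + PySem.Int.band x 1 * basePow) (basePow * base) base
  else ret
termination_by x.toNat
decreasing_by
  have h1 : x >>> (1 : Nat) = x / 2 := by rw [Int.shiftRight_eq_div_pow]; norm_num
  rw [h1]; omega

def GetRepr (x : Int) (base : Int) : Int := GetReprLoopA x 0 1 base

-- ===== PORT B =====
-- Source B: ret = 0; for i in range(x.bit_length()-1, -1, -1): ret = ret*base + ((x >> i) & 1)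
-- The downward range is ported as (List.range n).reverse = [n-1, …, 0].
def GetRepr_alt (x : Int) (base : Int) : Int :=
  (List.range (PySem.Int.bitLength x)).reverse.foldl
    (fun ret (i : Nat) => ret * base + PySem.Int.band (x >>> i) 1) 0

-- ===== PRECONDITION & SPEC =====
-- Pre_ excludes x < 0: there A's 'while (x)' loop never terminates (x >>= 1 stays negative),
-- so A returns on exactly the inputs with 0 ≤ x.
def Pre_GetRepr (x : Int) (base : Int) : Prop := 0 ≤ x
instance (x : Int) (base : Int) : Decidable (Pre_GetRepr x base) := by unfold Pre_GetRepr; infer_instance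
def pvWitness_GetRepr : Int × Int := (13, 3)

def Spec_GetRepr (x : Int) (base : Int) (out : Int) : Prop := out = GetRepr_alt x base
instance (x : Int) (base : Int) (out : Int) : Decidable (Spec_GetRepr x base out) := by unfold Spec_GetRepr; infer_instance

-- ===== CLAIM (what is proved, stated in full; the proofs are below) =====
def Claim_equal_GetRepr : Prop := ∀ (x : Int) (base : Int), Dom_GetRepr x base → Pre_GetRepr x base → Spec_GetRepr x base (GetRepr x base)

-- ===== LEMMAS AND PROOFS =====

-- Value of the low k bits of m in the given base: Σ_{i<k} bit_i(m)·base^i.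
def pvSum (m : Nat) (base : Int) : Nat → Int
  | 0 => 0
  | k + 1 => pvSum m base k + ((m >>> k &&& 1 : Nat) : Int) * base ^ k

theorem pv_cast_shift (m i : Nat) : ((m : Int) >>> i) = ((m >>> i : Nat) : Int) := by
  simp [Int.shiftRight_eq_div_pow, Nat.shiftRight_eq_div_pow]

theorem pv_bit_cast (m i : Nat) :
    PySem.Int.band ((m : Int) >>> i) 1 = ((m >>> i &&& 1 : Nat) : Int) := by
  rw [pv_cast_shift]
  exact_mod_cast PySem.Int.band_natCast (m >>> i) 1

theorem pv_bit_shift (m k : Nat) : (m >>> (k + 1)) &&& 1 = ((m / 2) >>> k) &&& 1 := by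
  simp [Nat.shiftRight_eq_div_pow, Nat.div_div_eq_div_mul, pow_succ, mul_comm]

theorem pvSum_shift (m : Nat) (base : Int) (k : Nat) :
    pvSum m base (k + 1) = ((m &&& 1 : Nat) : Int) + base * pvSum (m / 2) base k := by
  induction k with
  | zero => simp [pvSum]
  | succ k ih =>
    show pvSum m base (k + 1) + _ = _
    rw [ih, pv_bit_shift, pvSum]
    ring

-- B's foldl over [k-1, …, 0], from any accumulator.
theorem pv_fold_eq (m : Nat) (base : Int) (k : Nat) (acc : Int) :
    (List.range k).reverse.foldl
      (fun ret (i : Nat) => ret * base + PySem.Int.band ((m : Int) >>> i) 1) acc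
      = acc * base ^ k + pvSum m base k := by
  induction k generalizing acc with
  | zero => simp [pvSum]
  | succ k ih =>
    rw [List.range_succ, List.reverse_append]
    simp only [List.reverse_singleton, List.singleton_append, List.foldl_cons]
    rw [ih, pvSum, pv_bit_cast]
    ring

theorem pv_altB (m : Nat) (base : Int) :
    GetRepr_alt (m : Int) base = pvSum m base (PySem.Int.bitLength (m : Int)) := by
  unfold GetRepr_alt
  rw [pv_fold_eq]
  ring

-- A's loop invariant: it returns ret + basePow · (value of x's bits in base).
theorem pv_loopA (base : Int) (m : Nat) (ret bp : Int) :
    GetReprLoopA (m : Int) ret bp base = ret + bp * pvSum m base (PySem.Int.bitLength (m : Int)) := by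
  induction m using Nat.strong_induction_on generalizing ret bp with
  | _ m ih =>
    rw [GetReprLoopA]
    by_cases hm : 0 < m
    · rw [dif_pos (by exact_mod_cast hm)]
      have hs : ((m : Int) >>> (1 : Nat)) = ((m / 2 : Nat) : Int) := by
        rw [pv_cast_shift]; norm_num [Nat.shiftRight_eq_div_pow]
      rw [hs, ih (m / 2) (Nat.div_lt_self hm one_lt_two),
        PySem.Int.bitLength_natCast hm, pvSum_shift]
      have hb : PySem.Int.band (m : Int) 1 = ((m &&& 1 : Nat) : Int) := by
        exact_mod_cast PySem.Int.band_natCast m 1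
      rw [hb]; ring
    · have hm0 : m = 0 := by omega
      subst hm0
      simp [pvSum, PySem.Int.bitLength_zero]

-- ===== VERDICT (by name: the statement is the Claim_ definition above) =====
theorem GetRepr_spec : Claim_equal_GetRepr := by
  intro x base _ hx
  obtain ⟨m, rfl⟩ : ∃ m : Nat, x = (m : Int) := ⟨x.toNat, (Int.toNat_of_nonneg hx).symm⟩
  show GetRepr _ _ = GetRepr_alt _ _
  rw [GetRepr, pv_loopA, pv_altB]
  ring
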